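-- pv_equiv track=rewrite | github.com/raufus/AI-hacker | modules/technology_detection.py | create_tech_summary
-- ===== SOURCE A (Python) =====
-- from typing import Dict, List, Any
--
-- def create_tech_summary(technologies: List[Dict[str, Any]]) -> Dict[str, List[str]]:
--     """Create a summary of detected technologies by category"""
--     summary = {}
--
--     for tech in technologies:
--         tech_type = tech.get("type", "Unknown")
--         tech_name = tech.get("name", "Unknown")
--
--         if tech_type not in summary:
--             summary[tech_type] = []
--
--         if tech_name not in summary[tech_type]:
--             summary[tech_type].append(tech_name)
--
--     return summary
-- ===== SOURCE B (Python) =====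
-- def create_tech_summary(technologies):
--     """Create a summary of detected technologies by category"""
--     pairs = [(t.get("type", "Unknown"), t.get("name", "Unknown")) for t in technologies]
--     uniq = list(dict.fromkeys(pairs))
--     return {t: [n for (u, n) in uniq if u == t] for t in dict.fromkeys(u for u, _ in pairs)}
-- ===== Notes on version B (the rewrite author's own statement) =====
-- stated objective: alternative
-- what changed: Drops A's incrementally-updated dict-of-lists (with per-item membership checks) entirely: B extracts the flat (type, name) pair list, dedups the pairs once with dict.fromkeys, and then builds each group by filtering the deduped pair list per first-seen type.
import Mathlib
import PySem

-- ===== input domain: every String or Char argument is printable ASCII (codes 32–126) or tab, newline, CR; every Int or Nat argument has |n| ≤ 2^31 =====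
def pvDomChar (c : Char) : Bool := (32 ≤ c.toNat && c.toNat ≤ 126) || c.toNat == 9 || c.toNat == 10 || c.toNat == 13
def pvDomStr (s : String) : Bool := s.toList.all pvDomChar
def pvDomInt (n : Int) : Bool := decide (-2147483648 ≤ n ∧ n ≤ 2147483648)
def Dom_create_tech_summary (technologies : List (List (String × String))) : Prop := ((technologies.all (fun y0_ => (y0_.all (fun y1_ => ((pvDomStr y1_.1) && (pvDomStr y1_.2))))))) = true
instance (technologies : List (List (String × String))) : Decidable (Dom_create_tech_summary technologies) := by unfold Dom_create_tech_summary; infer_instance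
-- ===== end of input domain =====

-- B replaces A's incremental dict-of-lists loop by: extract the (type, name) pair list, dedup the pairs once, then build each
-- group by filtering the deduped pair list per first-seen type — no grouping table at all; same behaviour, different algorithm.

-- ===== PORT A =====
def create_tech_summary (technologies : List (List (String × String))) : List (String × List String) :=
  (technologies.foldl (fun summary tech =>
    let tech_type := (PySem.Dict.ofList tech).getD "type" "Unknown"
    let tech_name := (PySem.Dict.ofList tech).getD "name" "Unknown"
    let summary := if summary.contains tech_type then summary else summary.insert tech_type []
    let cur := summary.getD tech_type []
    if cur.contains tech_name then summary else summary.insert tech_type (cur ++ [tech_name]))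
    PySem.Dict.empty).items

-- ===== PORT B =====
def create_tech_summary_alt (technologies : List (List (String × String))) : List (String × List String) :=
  let pairs := technologies.map (fun t =>
    ((PySem.Dict.ofList t).getD "type" "Unknown", (PySem.Dict.ofList t).getD "name" "Unknown"))
  let uniq := PySem.List.dedup pairs
  (PySem.List.dedup (pairs.map (·.1))).map
    (fun t => (t, (uniq.filter (fun p => p.1 == t)).map (·.2)))

-- ===== PRECONDITION & SPEC =====
def Spec_create_tech_summary (technologies : List (List (String × String))) (out : List (String × List String)) : Prop := out = create_tech_summary_alt technologies
instance (technologies : List (List (String × String))) (out : List (String × List String)) : Decidable (Spec_create_tech_summary technologies out) := by unfold Spec_create_tech_summary; infer_instance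

-- ===== CLAIM (what is proved, stated in full; the proofs are below) =====
def Claim_equal_create_tech_summary : Prop := ∀ (technologies : List (List (String × String))), Dom_create_tech_summary technologies → Spec_create_tech_summary technologies (create_tech_summary technologies)

-- ===== LEMMAS AND PROOFS =====

/-- A's loop body as a function of the extracted (type, name) pair. -/
def stepA (s : PySem.Dict String (List String)) (p : String × String) : PySem.Dict String (List String) :=
  let s1 := if s.contains p.1 then s else s.insert p.1 []
  let cur := s1.getD p.1 []
  if cur.contains p.2 then s1 else s1.insert p.1 (cur ++ [p.2])

def techKey (tech : List (String × String)) : String × String :=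
  ((PySem.Dict.ofList tech).getD "type" "Unknown", (PySem.Dict.ofList tech).getD "name" "Unknown")

lemma foldA_eq (technologies : List (List (String × String))) (s : PySem.Dict String (List String)) :
    technologies.foldl (fun summary tech =>
      let tech_type := (PySem.Dict.ofList tech).getD "type" "Unknown"
      let tech_name := (PySem.Dict.ofList tech).getD "name" "Unknown"
      let summary := if summary.contains tech_type then summary else summary.insert tech_type []
      let cur := summary.getD tech_type []
      if cur.contains tech_name then summary else summary.insert tech_type (cur ++ [tech_name])) s
    = (technologies.map techKey).foldl stepA s := by
  rw [List.foldl_map]; rfl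

lemma keys_stepA (s : PySem.Dict String (List String)) (p : String × String) :
    (stepA s p).keys = PySem.Set.add s.keys p.1 := by
  unfold stepA PySem.Set.add PySem.Set.contains
  by_cases h : s.contains p.1 = true
  · have hm : s.keys.contains p.1 = true := by
      rw [PySem.Dict.contains_eq_decide_mem_keys] at h
      simpa using h
    simp only [h, if_true, hm]
    split
    · rfl
    · exact PySem.Dict.keys_insert_of_contains s _ h
  · have h' : s.contains p.1 = false := by simpa using h
    have hm : s.keys.contains p.1 = false := by
      rw [PySem.Dict.contains_eq_decide_mem_keys] at h'
      simpa using h'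
    have hcur : (s.insert p.1 []).getD p.1 ([] : List String) = [] :=
      PySem.Dict.getD_insert_self s p.1 [] []
    simp only [h', if_false, Bool.false_eq_true, hm, hcur, List.contains_nil]
    rw [PySem.Dict.keys_insert_of_contains _ _ (PySem.Dict.contains_insert_self s p.1 []),
        PySem.Dict.keys_insert_of_not_contains s _ h']

lemma keysA (l : List (String × String)) (s : PySem.Dict String (List String)) :
    (l.foldl stepA s).keys = PySem.Set.update s.keys (l.map (·.1)) := by
  induction l generalizing s with
  | nil => simp [PySem.Set.update]
  | cons p l ih =>
    simp only [List.foldl_cons, List.map_cons, PySem.Set.update, List.foldl_cons]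
    rw [ih, ← keys_stepA]
    rfl

lemma getD_stepA (s : PySem.Dict String (List String)) (p : String × String) (c : String) :
    (stepA s p).getD c [] = if p.1 = c then PySem.Set.add (s.getD c []) p.2 else s.getD c [] := by
  unfold stepA PySem.Set.add PySem.Set.contains
  by_cases hc : p.1 = c
  · subst hc
    by_cases h : s.contains p.1 = true
    · simp only [h, if_true]
      split
      · next hn => simp
      · next hn =>
        simp only [Bool.not_eq_true] at hn
        simp [PySem.Dict.getD_insert_self]
    · have h' : s.contains p.1 = false := by simpa using h
      have h0 : s.getD p.1 ([] : List String) = [] := PySem.Dict.getD_of_not_contains s [] h'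
      simp [h', h0, PySem.Dict.getD_insert_self]
  · by_cases h : s.contains p.1 = true
    · simp only [h, if_true]
      split
      · simp
      · simp [PySem.Dict.getD_insert, Ne.symm hc]
    · have h' : s.contains p.1 = false := by simpa using h
      simp [h', PySem.Dict.getD_insert_self, PySem.Dict.getD_insert, Ne.symm hc, hc]

lemma getDA (l : List (String × String)) (s : PySem.Dict String (List String)) (c : String) :
    (l.foldl stepA s).getD c [] = PySem.Set.update (s.getD c []) ((l.filter (fun p => p.1 == c)).map (·.2)) := by
  induction l generalizing s with
  | nil => simp [PySem.Set.update]
  | cons p l ih =>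
    simp only [List.foldl_cons, List.filter_cons]
    by_cases h : p.1 = c
    · have hb : (p.1 == c) = true := by simpa using h
      simp only [hb, if_true, List.map_cons, PySem.Set.update, List.foldl_cons]
      rw [ih, getD_stepA, if_pos h]
      rfl
    · have hb : (p.1 == c) = false := by simpa using h
      simp only [hb, Bool.false_eq_true, if_false]
      rw [ih, getD_stepA, if_neg h]

lemma nodupA (l : List (String × String)) : ((l.foldl stepA PySem.Dict.empty).keys).Nodup := by
  rw [keysA, PySem.Dict.keys_empty]
  exact PySem.Set.nodup_update _ _ List.nodup_nil

/-- `discard` is a filter (definitional). -/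
lemma discard_eq_filter {α : Type} [BEq α] (s : List α) (x : α) :
    PySem.Set.discard s x = s.filter (fun y => !(y == x)) := rfl

/-- Ordered dedup commutes with filtering. -/
lemma ofList_filter {α : Type} [BEq α] [LawfulBEq α] (P : α → Bool) (l : List α) :
    PySem.Set.ofList (l.filter P) = (PySem.Set.ofList l).filter P := by
  induction l with
  | nil => rfl
  | cons a l ih =>
    rw [List.filter_cons, PySem.Set.ofList_cons]
    by_cases hP : P a = true
    · simp only [hP, if_true, PySem.Set.ofList_cons, List.filter_cons, ih,
        discard_eq_filter, List.filter_filter]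
      exact congrArg (a :: ·) (List.filter_congr (fun y _ => by rw [Bool.and_comm]))
    · have hP' : P a = false := by simpa using hP
      simp only [hP', Bool.false_eq_true, if_false, List.filter_cons, ih,
        discard_eq_filter, List.filter_filter]
      refine List.filter_congr (fun y hy => ?_)
      by_cases hya : y = a
      · subst hya; simp [hP']
      · simp [show (y == a) = false by simpa using hya]

/-- Ordered dedup commutes with mapping an injective-on-the-list function. -/
lemma ofList_map_inj {α β : Type} [BEq α] [LawfulBEq α] [BEq β] [LawfulBEq β]
    (f : α → β) (l : List α) (h : ∀ a ∈ l, ∀ b ∈ l, f a = f b → a = b) :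
    PySem.Set.ofList (l.map f) = (PySem.Set.ofList l).map f := by
  induction l with
  | nil => rfl
  | cons a l ih =>
    rw [List.map_cons, PySem.Set.ofList_cons, PySem.Set.ofList_cons, List.map_cons,
      ih (fun x hx y hy => h x (List.mem_cons_of_mem a hx) y (List.mem_cons_of_mem a hy)),
      discard_eq_filter, discard_eq_filter, List.filter_map]
    refine congrArg (f a :: ·) (congrArg (List.map f) (List.filter_congr (fun y hy => ?_)))
    have hyl : y ∈ l := (PySem.List.mem_dedup l y).mp hy
    have key : (f y == f a) = (y == a) := by
      by_cases hya : y = a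
      · subst hya; simp
      · have hfy : ¬ f y = f a := fun hf =>
          hya (h y (List.mem_cons_of_mem a hyl) a List.mem_cons_self hf)
        simp [hya, hfy]
    simp only [Function.comp, key]

-- ===== VERDICT (by name: the statement is the Claim_ definition above) =====
theorem create_tech_summary_spec : Claim_equal_create_tech_summary := by
  intro technologies _
  unfold Spec_create_tech_summary create_tech_summary create_tech_summary_alt
  rw [foldA_eq]
  show ((technologies.map techKey).foldl stepA PySem.Dict.empty).items =
    (PySem.List.dedup ((technologies.map techKey).map (·.1))).map
      (fun t => (t, ((PySem.List.dedup (technologies.map techKey)).filter (fun p => p.1 == t)).map (·.2)))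
  set ps := technologies.map techKey with hps
  rw [PySem.Dict.items_eq_map_keys _ (nodupA ps) ([] : List String),
      keysA, PySem.Dict.keys_empty, PySem.List.dedup_eq_ofList, PySem.List.dedup_eq_ofList,
      PySem.Set.update_nil_left]
  refine List.map_congr_left (fun k hk => ?_)
  have hA : (ps.foldl stepA PySem.Dict.empty).getD k [] =
      PySem.Set.ofList ((ps.filter (fun p => p.1 == k)).map (·.2)) := by
    rw [getDA, PySem.Dict.getD_empty, PySem.Set.update_nil_left]
  rw [hA, ← ofList_filter (fun p => p.1 == k) ps]
  have hinj : ∀ a ∈ ps.filter (fun p => p.1 == k), ∀ b ∈ ps.filter (fun p => p.1 == k),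
      (fun p : String × String => p.2) a = (fun p : String × String => p.2) b → a = b := by
    intro a ha b hb hab
    have ha1 : a.1 = k := by simpa using (List.mem_filter.mp ha).2
    have hb1 : b.1 = k := by simpa using (List.mem_filter.mp hb).2
    exact Prod.ext (ha1.trans hb1.symm) hab
  rw [ofList_map_inj (fun p : String × String => p.2) (ps.filter (fun p => p.1 == k)) hinj]
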